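-- pv_equiv track=rewrite | github.com/trvslhlt/sweetword-analyser | src/util/word_statistics.py | getIndexSensitiveCharacterDiffCount
-- ===== SOURCE A (Python) =====
-- paddingCharacter = '*'
--
-- def getIndexSensitiveCharacterDiffCount(comparisonWord, words):
--     diffCounts = []
--     for word in words:
--         diffCount = 0
--         while len(word) > len(comparisonWord):
--             diffCount += 1
--             word = word[:-1]
--         while len(word) < len(comparisonWord):
--             word += paddingCharacter
--         for letterIdx in range(0, len(comparisonWord)):
--             if word[letterIdx] != comparisonWord[letterIdx]:
--                 diffCount += 1
--         diffCounts.append(diffCount)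
--     return diffCounts
-- ===== SOURCE B (Python) =====
-- paddingCharacter = '*'
--
-- def getIndexSensitiveCharacterDiffCount(comparisonWord, words):
--     n = len(comparisonWord)
--     out = []
--     for word in words:
--         excess = len(word) - n if len(word) > n else 0
--         mismatches = sum(1 for a, b in zip(word, comparisonWord) if a != b)
--         tail = sum(1 for c in comparisonWord[len(word):] if c != paddingCharacter)
--         out.append(excess + mismatches + tail)
--     return out
-- ===== Notes on version B (the rewrite author's own statement) =====
-- stated objective: faster
-- what changed: B replaces A's repeated word[:-1] truncation loop and explicit '*'-padding with an arithmetic excess count plus one zip pass over the common prefix and one pass over the uncovered tail of the comparison word.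
import Mathlib
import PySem

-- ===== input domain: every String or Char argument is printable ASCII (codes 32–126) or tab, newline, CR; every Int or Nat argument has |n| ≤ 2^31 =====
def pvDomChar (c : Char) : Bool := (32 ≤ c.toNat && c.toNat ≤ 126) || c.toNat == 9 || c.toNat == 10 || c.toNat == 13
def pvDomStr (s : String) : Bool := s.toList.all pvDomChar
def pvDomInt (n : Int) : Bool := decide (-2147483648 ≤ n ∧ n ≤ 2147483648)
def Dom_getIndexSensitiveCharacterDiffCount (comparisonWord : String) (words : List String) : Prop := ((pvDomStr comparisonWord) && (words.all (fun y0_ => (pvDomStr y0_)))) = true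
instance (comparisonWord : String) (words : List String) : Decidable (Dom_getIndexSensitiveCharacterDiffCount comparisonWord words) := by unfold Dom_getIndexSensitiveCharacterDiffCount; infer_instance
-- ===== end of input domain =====

-- B replaces A's repeated word[:-1] truncation loop and explicit '*'-padding with an arithmetic
-- excess count plus one pass over the common prefix and one over the uncovered tail (objective: faster).

-- ===== PORT A =====
-- while len(word) > len(comparisonWord): diffCount += 1; word = word[:-1]
def pvTrunc (n : Nat) (w : List Char) (d : Int) : List Char × Int :=
  if w.length > n then pvTrunc n w.dropLast (d + 1) else (w, d)
termination_by w.length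
decreasing_by simp_all; omega

-- while len(word) < len(comparisonWord): word += paddingCharacter
def pvPad (n : Nat) (w : List Char) : List Char :=
  if w.length < n then pvPad n (w ++ ['*']) else w
termination_by n - w.length
decreasing_by simp_all; omega

def getIndexSensitiveCharacterDiffCount (comparisonWord : String) (words : List String) : List Int :=
  let cl := comparisonWord.toList
  words.foldl (fun diffCounts word =>
    let r := pvTrunc cl.length word.toList 0
    let w2 := pvPad cl.length r.1
    -- for letterIdx in range(0, len(comparisonWord)):  (nonnegative bounds, so List.range;
    -- letterIdx is always in range of both strings, so getD is Python's exact indexing here)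
    let d := (List.range cl.length).foldl
      (fun d i => if w2.getD i '*' != cl.getD i '*' then d + 1 else d) r.2
    diffCounts ++ [d]) []

-- ===== PORT B =====
def getIndexSensitiveCharacterDiffCount_alt (comparisonWord : String) (words : List String) : List Int :=
  let cl := comparisonWord.toList
  words.map (fun word =>
    let wl := word.toList
    let excess : Int := if wl.length > cl.length then (wl.length : Int) - cl.length else 0
    -- sum(1 for a, b in zip(word, comparisonWord) if a != b)
    let mismatches : Int := ((wl.zip cl).countP (fun p => p.1 != p.2) : Nat)
    -- comparisonWord[len(word):] with a nonnegative start is exactly List.drop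
    let tail : Int := ((cl.drop wl.length).countP (fun c => c != '*') : Nat)
    excess + mismatches + tail)

-- ===== PRECONDITION & SPEC =====
def Spec_getIndexSensitiveCharacterDiffCount (comparisonWord : String) (words : List String) (out : List Int) : Prop := out = getIndexSensitiveCharacterDiffCount_alt comparisonWord words
instance (comparisonWord : String) (words : List String) (out : List Int) : Decidable (Spec_getIndexSensitiveCharacterDiffCount comparisonWord words out) := by unfold Spec_getIndexSensitiveCharacterDiffCount; infer_instance

-- ===== CLAIM (what is proved, stated in full; the proofs are below) =====
def Claim_equal_getIndexSensitiveCharacterDiffCount : Prop := ∀ (comparisonWord : String) (words : List String), Dom_getIndexSensitiveCharacterDiffCount comparisonWord words → Spec_getIndexSensitiveCharacterDiffCount comparisonWord words (getIndexSensitiveCharacterDiffCount comparisonWord words)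

-- ===== LEMMAS AND PROOFS =====


lemma pvTrunc_spec (n : Nat) (w : List Char) (d : Int) :
    pvTrunc n w d = (w.take n, d + ((w.length - n : Nat) : Int)) := by
  fun_induction pvTrunc n w d with
  | case1 w d h ih =>
      rw [ih]
      refine Prod.ext ?_ ?_
      · show List.take n w.dropLast = List.take n w
        rw [List.dropLast_eq_take, List.take_take]
        congr 1; omega
      · show d + 1 + ((w.dropLast.length - n : Nat) : Int) = d + ((w.length - n : Nat) : Int)
        rw [List.length_dropLast]; omega
  | case2 w d h =>
      simp at h
      simp [List.take_of_length_le h]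
      omega

lemma pvPad_spec (n : Nat) (w : List Char) :
    pvPad n w = w ++ List.replicate (n - w.length) '*' := by
  fun_induction pvPad n w with
  | case1 w h ih =>
      rw [ih]
      rw [List.append_assoc]
      congr 1
      simp
      rw [show n - w.length = (n - (w.length+1)) + 1 by omega, List.replicate_succ]
  | case2 w h =>
      simp at h
      simp [Nat.sub_eq_zero_of_le h]

lemma rangeFold_count (Y X : List Char) (d : Int) (h : X.length = Y.length) :
    (List.range Y.length).foldl
      (fun d i => if X.getD i '*' != Y.getD i '*' then d + 1 else d) d
    = d + ((X.zip Y).countP (fun p => p.1 != p.2) : Nat) := by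
  induction Y generalizing X d with
  | nil => simp
  | cons y ys ih =>
      cases X with
      | nil => simp at h
      | cons x xs =>
          simp only [List.length_cons, List.range_succ_eq_map, List.foldl_cons, List.foldl_map]
          simp only [List.getD_cons_succ, List.getD_cons_zero]
          rw [ih xs _ (by simpa using h)]
          simp only [List.zip_cons_cons, List.countP_cons]
          by_cases hxy : x = y
          · simp [hxy]
          · simp [hxy]; ring

lemma zipTake (xs ys : List Char) (n : Nat) (h : ys.length ≤ n) : (xs.take n).zip ys = xs.zip ys := by
  induction xs generalizing ys n with
  | nil => simp
  | cons x xs ih =>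
      cases ys with
      | nil => simp
      | cons y ys =>
          cases n with
          | zero => simp at h
          | succ m => simp [ih ys m (by simpa using h)]

lemma zipTakeRight (xs ys : List Char) (n : Nat) (h : xs.length ≤ n) : xs.zip (ys.take n) = xs.zip ys := by
  induction xs generalizing ys n with
  | nil => simp
  | cons x xs ih =>
      cases ys with
      | nil => simp
      | cons y ys =>
          cases n with
          | zero => simp at h
          | succ m => simp [ih ys m (by simpa using h)]

lemma zipReplicateCount (m : Nat) (ys : List Char) (h : ys.length = m) :
    ((List.replicate m '*').zip ys).countP (fun p => p.1 != p.2)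
      = ys.countP (fun c => c != '*') := by
  induction ys generalizing m with
  | nil => simp
  | cons y ys ih =>
      cases m with
      | zero => simp at h
      | succ k =>
          simp only [List.replicate_succ, List.zip_cons_cons, List.countP_cons]
          rw [ih k (by simpa using h)]
          congr 1
          by_cases hy : y = '*'
          · simp [hy]
          · simp [bne, hy, Ne.symm hy]

lemma perWord (cl wl : List Char) :
    (List.range cl.length).foldl
      (fun d i => if (pvPad cl.length (pvTrunc cl.length wl 0).1).getD i '*' != cl.getD i '*' then d + 1 else d)
      (pvTrunc cl.length wl 0).2
    = (if wl.length > cl.length then (wl.length : Int) - cl.length else 0)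
      + ((wl.zip cl).countP (fun p => p.1 != p.2) : Nat)
      + ((cl.drop wl.length).countP (fun c => c != '*') : Nat) := by
  rw [pvTrunc_spec, pvPad_spec]
  set n := cl.length with hn
  set t := wl.take n with ht
  have hk : t.length = min wl.length n := by simp [ht, Nat.min_comm]
  have hlen : (t ++ List.replicate (n - t.length) '*').length = n := by
    simp; omega
  rw [rangeFold_count cl _ _ (by rw [hlen, hn])]
  have hsplit : cl = cl.take t.length ++ cl.drop t.length := (List.take_append_drop _ _).symm
  have hz : (t ++ List.replicate (n - t.length) '*').zip cl
      = t.zip (cl.take t.length) ++ (List.replicate (n - t.length) '*').zip (cl.drop t.length) := by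
    conv_lhs => rw [hsplit]
    exact List.zip_append (by simp; omega)
  rw [hz, List.countP_append]
  have h1 : t.zip (cl.take t.length) = wl.zip cl := by
    rw [zipTakeRight _ _ _ (le_of_eq rfl), ht, zipTake _ _ _ (le_of_eq hn.symm)]
  have h2 : ((List.replicate (n - t.length) '*').zip (cl.drop t.length)).countP (fun p => p.1 != p.2)
      = (cl.drop t.length).countP (fun c => c != '*') :=
    zipReplicateCount _ _ (by simp; omega)
  rw [h1, h2]
  have h3 : (cl.drop t.length).countP (fun c => c != '*') = (cl.drop wl.length).countP (fun c => c != '*') := by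
    by_cases hle : wl.length ≤ n
    · rw [hk, Nat.min_eq_left hle]
    · rw [List.drop_eq_nil_of_le (by omega), List.drop_eq_nil_of_le (by omega)]
  rw [h3]
  by_cases hgt : wl.length > n
  · simp only [if_pos hgt]; omega
  · simp only [if_neg hgt]
    have : wl.length - n = 0 := by omega
    rw [this]; push_cast; ring

-- ===== VERDICT (by name: the statement is the Claim_ definition above) =====
theorem getIndexSensitiveCharacterDiffCount_spec : Claim_equal_getIndexSensitiveCharacterDiffCount := by
  intro comparisonWord words _
  unfold Spec_getIndexSensitiveCharacterDiffCount
  unfold getIndexSensitiveCharacterDiffCount getIndexSensitiveCharacterDiffCount_alt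
  simp only []
  rw [PySem.List.foldl_append_singleton_eq_map]
  apply List.map_congr_left
  intro word _
  exact perWord comparisonWord.toList word.toList
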